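-- pv_equiv track=rewrite | github.com/MateoGonzalezPautaso/fiuba-computer-engineering | TB024-teoria-de-algoritmos/TP3/algoritmos/aproximador_pakku.py | aproximador_pakku
-- ===== SOURCE A (Python) =====
-- def grupo_min(suma_grupos_greedy, k):
--     minima_suma = suma_grupos_greedy[0]
--     idx_min = 0
--
--     for i in range(1, k):
--         suma_act = suma_grupos_greedy[i]
--
--         if suma_act < minima_suma:
--             minima_suma = suma_act
--             idx_min = i
--
--     return idx_min
--
-- def aproximador_pakku(maestros_agua, k):
--     if k < 0 or not maestros_agua:
--         return None, 0
--
--     grupos = [[] for i in range(k)]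
--     adic_pakku = 0
--     suma_grupos_pakku = [0] * k
--
--     maestros_agua = sorted(maestros_agua, key=lambda x:x[1], reverse=True)
--
--     for maestro in maestros_agua:
--         nombre, poder = maestro
--
--         # Grupo con la menor suma actual
--         idx_g_min = grupo_min(suma_grupos_pakku, k)
--
--         suma_sin = suma_grupos_pakku[idx_g_min]
--         suma_con = suma_sin + poder
--
--         grupos[idx_g_min].append(maestro)
--         suma_grupos_pakku[idx_g_min] = suma_con
--
--         adic_pakku = adic_pakku - (suma_sin ** 2) + (suma_con ** 2)
--
--     return grupos, adic_pakku
-- ===== SOURCE B (Python) =====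
-- def aproximador_pakku(maestros_agua, k):
--     if k < 0 or not maestros_agua:
--         return None, 0
--
--     grupos = [[] for _ in range(k)]
--     # ascending-sorted list of (group sum, group index); its head is always
--     # the group with minimal sum, ties broken by lowest index
--     sumas = [(0, i) for i in range(k)]
--     adic_pakku = 0
--
--     for maestro in sorted(maestros_agua, key=lambda x: x[1], reverse=True):
--         s, i = sumas[0]
--         ns = s + maestro[1]
--         grupos[i].append(maestro)
--         adic_pakku += ns * ns - s * s
--         del sumas[0]
--         # binary search for the insertion point that keeps sumas sorted
--         # (to the right of equal entries)
--         x = (ns, i)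
--         lo, hi = 0, len(sumas)
--         while lo < hi:
--             mid = (lo + hi) // 2
--             if x < sumas[mid]:
--                 hi = mid
--             else:
--                 lo = mid + 1
--         sumas.insert(lo, x)
--
--     return grupos, adic_pakku
-- ===== Notes on version B (the rewrite author's own statement) =====
-- stated objective: faster
-- what changed: A rescans all k group sums with a helper argmin pass for every maestro; B keeps the (sum, group-index) pairs in an ascending-sorted list whose head is the minimal group (ties by lowest index) and re-inserts the updated pair via a hand-written binary search, replacing the Theta(k) interpreted scan per element by O(log k) comparisons (the list delete/insert is still O(k) but as a C-level memmove).
import Mathlib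
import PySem

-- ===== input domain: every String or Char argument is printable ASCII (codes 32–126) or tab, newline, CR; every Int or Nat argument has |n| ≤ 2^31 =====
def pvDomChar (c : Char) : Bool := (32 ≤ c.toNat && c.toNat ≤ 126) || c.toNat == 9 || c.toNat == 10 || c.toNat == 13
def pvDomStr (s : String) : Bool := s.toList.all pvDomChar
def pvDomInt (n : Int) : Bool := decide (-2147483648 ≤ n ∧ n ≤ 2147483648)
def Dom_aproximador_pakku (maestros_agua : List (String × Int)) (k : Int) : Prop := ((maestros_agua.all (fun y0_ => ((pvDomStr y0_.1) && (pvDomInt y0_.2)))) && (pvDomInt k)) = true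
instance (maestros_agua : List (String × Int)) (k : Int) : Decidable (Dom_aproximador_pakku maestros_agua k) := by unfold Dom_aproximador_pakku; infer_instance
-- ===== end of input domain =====

-- B replaces A's per-element linear argmin scan over all k group sums by a sorted list of
-- (sum, index) pairs whose head is popped and re-inserted via binary search (objective: faster,
-- measured).
-- ===== PORT A =====
def grupo_min (suma_grupos_greedy : List Int) (k : Int) : Int :=
  ((PySem.List.pyRange 1 k 1).foldl
    (fun (st : Int × Int) i =>
      let suma_act := PySem.List.pyGetD suma_grupos_greedy i 0
      if suma_act < st.1 then (suma_act, i) else st)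
    (PySem.List.pyGetD suma_grupos_greedy 0 0, 0)).2

def pakkuStepA (k : Int) (st : List (List (String × Int)) × List Int × Int)
    (maestro : String × Int) : List (List (String × Int)) × List Int × Int :=
  let idx_g_min := grupo_min st.2.1 k
  let suma_sin := PySem.List.pyGetD st.2.1 idx_g_min 0
  let suma_con := suma_sin + maestro.2
  (st.1.modify idx_g_min.toNat (fun g => g ++ [maestro]),
   st.2.1.set idx_g_min.toNat suma_con,
   st.2.2 - suma_sin ^ 2 + suma_con ^ 2)

def aproximador_pakku (maestros_agua : List (String × Int)) (k : Int) : (Option (List (List (String × Int)))) × Int :=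
  if k < 0 ∨ maestros_agua = [] then (none, 0)
  else
    let st := (PySem.List.sorted maestros_agua (fun x => x.2) true).foldl (pakkuStepA k)
      (List.replicate k.toNat [], List.replicate k.toNat 0, 0)
    (some st.1, st.2.2)

-- ===== PORT B =====
def pvLexLt (a b : Int × Int) : Bool := a.1 < b.1 || (a.1 == b.1 && a.2 < b.2)  -- Python tuple '<'

-- the binary-search while loop; sumas[mid] via getD is exact: lo < hi ≤ len keeps mid in range
def bisectLoop (sumas : List (Int × Int)) (x : Int × Int) (lo hi : Nat) : Nat :=
  if h : lo < hi then
    let mid := (lo + hi) / 2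
    if pvLexLt x (sumas.getD mid (0, 0)) then bisectLoop sumas x lo mid
    else bisectLoop sumas x (mid + 1) hi
  else lo
termination_by hi - lo
decreasing_by all_goals omega

def pakkuStepB (st : List (List (String × Int)) × List (Int × Int) × Int)
    (maestro : String × Int) : List (List (String × Int)) × List (Int × Int) × Int :=
  match st.2.1 with
  | [] => st           -- Python raises here (pop from empty); outside Pre_
  | (s, i) :: rest =>
    let ns := s + maestro.2
    let x := (ns, i)
    let j := bisectLoop rest x 0 rest.length
    (st.1.modify i.toNat (fun g => g ++ [maestro]),
     rest.take j ++ x :: rest.drop j,         -- sumas.insert(lo, x)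
     st.2.2 + (ns * ns - s * s))

def aproximador_pakku_alt (maestros_agua : List (String × Int)) (k : Int) : (Option (List (List (String × Int)))) × Int :=
  if k < 0 ∨ maestros_agua = [] then (none, 0)
  else
    let st := (PySem.List.sorted maestros_agua (fun x => x.2) true).foldl pakkuStepB
      (List.replicate k.toNat [], (List.range k.toNat).map (fun i : Nat => ((0:Int), (i:Int))), 0)
    (some st.1, st.2.2)

-- ===== PRECONDITION & SPEC =====
-- Pre_ excludes only k = 0 with a nonempty list, where Python A raises IndexError
-- (grupo_min reads suma_grupos_greedy[0] of an empty list); B also raises there.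
def Pre_aproximador_pakku (maestros_agua : List (String × Int)) (k : Int) : Prop :=
  k ≠ 0 ∨ maestros_agua = []
instance (maestros_agua : List (String × Int)) (k : Int) : Decidable (Pre_aproximador_pakku maestros_agua k) := by unfold Pre_aproximador_pakku; infer_instance
def pvWitness_aproximador_pakku : (List (String × Int)) × Int := ([("a", 3), ("b", 1), ("c", 2)], 2)

def Spec_aproximador_pakku (maestros_agua : List (String × Int)) (k : Int) (out : (Option (List (List (String × Int)))) × Int) : Prop := out = aproximador_pakku_alt maestros_agua k
instance (maestros_agua : List (String × Int)) (k : Int) (out : (Option (List (List (String × Int)))) × Int) : Decidable (Spec_aproximador_pakku maestros_agua k out) := by unfold Spec_aproximador_pakku; infer_instance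

-- ===== CLAIM (what is proved, stated in full; the proofs are below) =====
def Claim_equal_aproximador_pakku : Prop := ∀ (maestros_agua : List (String × Int)) (k : Int), Dom_aproximador_pakku maestros_agua k → Pre_aproximador_pakku maestros_agua k → Spec_aproximador_pakku maestros_agua k (aproximador_pakku maestros_agua k)

-- ===== LEMMAS AND PROOFS =====

-- lexicographic ≤ on (sum, index), the order insertar maintains
def lexLe (a b : Int × Int) : Prop := a.1 < b.1 ∨ (a.1 = b.1 ∧ a.2 ≤ b.2)

-- proof-side recursive formulation of the ordered insertion
def insertarRec (xs : List (Int × Int)) (x : Int × Int) : List (Int × Int) :=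
  match xs with
  | [] => [x]
  | y :: ys => if pvLexLt x y then x :: y :: ys else y :: insertarRec ys x

-- the multiset of (group sum, group index) pairs of A's sum table
def pairs (s : List Int) : List (Int × Int) :=
  (List.range s.length).map (fun j => (s.getD j 0, (j : Int)))

theorem lexLe_refl (a : Int × Int) : lexLe a a := by simp [lexLe]

theorem lexLe_trans {a b c : Int × Int} (h1 : lexLe a b) (h2 : lexLe b c) : lexLe a c := by
  rcases h1 with h1 | ⟨h1, h1'⟩ <;> rcases h2 with h2 | ⟨h2, h2'⟩ <;> simp [lexLe] <;> omega

theorem lexLe_antisymm {a b : Int × Int} (h1 : lexLe a b) (h2 : lexLe b a) : a = b := by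
  rcases a with ⟨a1, a2⟩; rcases b with ⟨b1, b2⟩
  rcases h1 with h1 | ⟨h1, h1'⟩ <;> rcases h2 with h2 | ⟨h2, h2'⟩ <;> simp_all <;> omega

theorem pvLexLt_imp {a b : Int × Int} (h : pvLexLt a b = true) : lexLe a b := by
  simp [pvLexLt] at h; rcases h with h | ⟨h, h'⟩ <;> simp [lexLe] <;> omega

theorem pvLexLt_neg {a b : Int × Int} (h : pvLexLt a b = false) : lexLe b a := by
  simp [pvLexLt] at h; simp [lexLe]; omega


theorem pvLexLt_iff (a b : Int × Int) :
    pvLexLt a b = true ↔ (a.1 < b.1 ∨ (a.1 = b.1 ∧ a.2 < b.2)) := by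
  simp [pvLexLt]

theorem pvLexLt_of_lt_of_le {x a b : Int × Int} (h1 : pvLexLt x a = true) (h2 : lexLe a b) :
    pvLexLt x b = true := by
  rw [pvLexLt_iff] at h1 ⊢
  unfold lexLe at h2
  omega

theorem pvLexLt_false_of_le {x a b : Int × Int} (h1 : pvLexLt x b = false)
    (h2 : lexLe a b) : pvLexLt x a = false := by
  rw [Bool.eq_false_iff, Ne, pvLexLt_iff] at h1 ⊢
  unfold lexLe at h2
  omega

-- the binary search returns a valid bisect-right position in a sorted list
theorem bisect_spec (xs : List (Int × Int)) (x : Int × Int) (hs : xs.Pairwise lexLe)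
    (fuel : Nat) : ∀ lo hi : Nat, hi - lo = fuel → lo ≤ hi → hi ≤ xs.length →
    (∀ i : Nat, i < lo → pvLexLt x (xs.getD i (0, 0)) = false) →
    (∀ i : Nat, hi ≤ i → i < xs.length → pvLexLt x (xs.getD i (0, 0)) = true) →
    bisectLoop xs x lo hi ≤ xs.length ∧
    (∀ i : Nat, i < bisectLoop xs x lo hi → pvLexLt x (xs.getD i (0, 0)) = false) ∧
    (∀ i : Nat, bisectLoop xs x lo hi ≤ i → i < xs.length → pvLexLt x (xs.getD i (0, 0)) = true) := by
  have hmono : ∀ p q : Nat, p ≤ q → q < xs.length → lexLe (xs.getD p (0, 0)) (xs.getD q (0, 0)) := by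
    intro p q hpq hq
    rcases Nat.lt_or_ge p q with hlt | hge
    · rw [List.getD_eq_getElem _ _ (by omega), List.getD_eq_getElem _ _ hq]
      exact List.pairwise_iff_getElem.1 hs p q (by omega) hq hlt
    · have : p = q := by omega
      subst this; exact lexLe_refl _
  induction fuel using Nat.strong_induction_on with
  | _ fuel ih =>
    intro lo hi hf hlh hhl hlow hhigh
    by_cases hlt : lo < hi
    · rw [bisectLoop, dif_pos hlt]
      cases hx : pvLexLt x (xs.getD ((lo + hi) / 2) (0, 0)) with
      | true =>
        rw [if_pos hx]
        refine ih ((lo + hi) / 2 - lo) (by omega) lo ((lo + hi) / 2) rfl (by omega) (by omega)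
          hlow ?_
        intro i hi1 hi2
        exact pvLexLt_of_lt_of_le hx (hmono _ _ hi1 hi2)
      | false =>
        have hx' : ¬ (pvLexLt x (xs.getD ((lo + hi) / 2) (0, 0)) = true) := by
          rw [hx]; simp
        rw [if_neg hx']
        refine ih (hi - ((lo + hi) / 2 + 1)) (by omega) ((lo + hi) / 2 + 1) hi rfl (by omega)
          hhl ?_ hhigh
        intro i hi1
        exact pvLexLt_false_of_le hx (hmono _ _ (by omega) (by omega))
    · rw [bisectLoop, dif_neg hlt]
      have : lo = hi := by omega
      subst this
      exact ⟨by omega, hlow, hhigh⟩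

-- inserting at a valid bisect position is the ordered insertion
theorem insertAt_eq_rec (x : Int × Int) : ∀ (xs : List (Int × Int)) (j : Nat), j ≤ xs.length →
    (∀ i : Nat, i < j → pvLexLt x (xs.getD i (0, 0)) = false) →
    (∀ i : Nat, j ≤ i → i < xs.length → pvLexLt x (xs.getD i (0, 0)) = true) →
    xs.take j ++ x :: xs.drop j = insertarRec xs x := by
  intro xs
  induction xs with
  | nil =>
    intro j hj _ _
    have : j = 0 := by simpa using hj
    subst this
    rfl
  | cons y ys ih =>
    intro j hj hlow hhigh
    cases j with
    | zero =>
      have h0 : pvLexLt x y = true := by simpa using hhigh 0 (by omega) (by simp)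
      simp [insertarRec, h0]
    | succ m =>
      have h0 : pvLexLt x y = false := by simpa using hlow 0 (by omega)
      simp only [List.take_succ_cons, List.drop_succ_cons, List.cons_append]
      rw [insertarRec, if_neg (by simp [h0])]
      congr 1
      refine ih m (by simpa using hj) ?_ ?_
      · intro i hi
        simpa using hlow (i + 1) (by omega)
      · intro i hi1 hi2
        simpa using hhigh (i + 1) (by omega) (by simpa using hi2)

theorem bisect_insert_eq_rec (xs : List (Int × Int)) (x : Int × Int)
    (hs : xs.Pairwise lexLe) :
    xs.take (bisectLoop xs x 0 xs.length) ++ x :: xs.drop (bisectLoop xs x 0 xs.length) =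
      insertarRec xs x := by
  obtain ⟨h1, h2, h3⟩ := bisect_spec xs x hs xs.length 0 xs.length (by omega) (by omega)
    le_rfl (by omega) (by omega)
  exact insertAt_eq_rec x xs _ h1 h2 h3
theorem mem_insertarRec {xs : List (Int × Int)} {x z : Int × Int} (h : z ∈ insertarRec xs x) :
    z = x ∨ z ∈ xs := by
  induction xs with
  | nil => simpa [insertarRec] using h
  | cons y ys ih =>
    cases hcb : pvLexLt x y with
    | true =>
      simp [insertarRec, hcb] at h
      rcases h with h | h | h <;> simp [h]
    | false =>
      simp [insertarRec, hcb] at h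
      rcases h with h | h
      · simp [h]
      · rcases ih h with h' | h' <;> simp [h']

theorem insertarRec_perm (xs : List (Int × Int)) (x : Int × Int) :
    (insertarRec xs x).Perm (x :: xs) := by
  induction xs with
  | nil => simp [insertarRec]
  | cons y ys ih =>
    cases hcb : pvLexLt x y with
    | true => simp [insertarRec, hcb]
    | false =>
      simp only [insertarRec, hcb, Bool.false_eq_true, if_neg, not_false_iff]
      exact (ih.cons y).trans (List.Perm.swap x y ys)

theorem insertarRec_pairwise {xs : List (Int × Int)} {x : Int × Int}
    (h : xs.Pairwise lexLe) : (insertarRec xs x).Pairwise lexLe := by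
  induction xs with
  | nil => simp [insertarRec]
  | cons y ys ih =>
    rcases List.pairwise_cons.1 h with ⟨hy, hys⟩
    cases hcb : pvLexLt x y with
    | true =>
      have hx := pvLexLt_imp hcb
      simp only [insertarRec, hcb, if_pos]
      refine List.pairwise_cons.2 ⟨?_, h⟩
      intro z hz
      rcases hz with _ | hz
      · exact hx
      · exact lexLe_trans hx (hy _ (by assumption))
    | false =>
      simp only [insertarRec, hcb, Bool.false_eq_true, if_neg, not_false_iff]
      refine List.pairwise_cons.2 ⟨?_, ih hys⟩
      intro z hz
      rcases mem_insertarRec hz with rfl | hz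
      · exact pvLexLt_neg hcb
      · exact hy _ hz

theorem length_pairs (s : List Int) : (pairs s).length = s.length := by simp [pairs]

theorem mem_pairs {s : List Int} {p : Int × Int} :
    p ∈ pairs s ↔ ∃ j : Nat, j < s.length ∧ p = (s.getD j 0, (j : Int)) := by
  simp [pairs, eq_comm]

theorem getElem_pairs (s : List Int) (n : Nat) (hn : n < (pairs s).length) :
    (pairs s)[n] = (s.getD n 0, (n : Int)) := by
  simp [pairs]

-- pairs of a one-point update is a one-point update of pairs
theorem pairs_set (s : List Int) (n : Nat) (v : Int) (h : n < s.length) :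
    pairs (s.set n v) = (pairs s).set n (v, (n : Int)) := by
  apply List.ext_getElem (by simp [pairs])
  intro j h1 h2
  have hj : j < s.length := by simpa [pairs] using h1
  rw [getElem_pairs (s.set n v) j (by simpa [length_pairs] using hj), List.getElem_set]
  by_cases hjn : n = j
  · subst hjn; simp [List.getD, hj]
  · rw [if_neg hjn, getElem_pairs s j (by simpa [length_pairs] using hj)]
    simp [List.getD, hjn]

theorem set_perm_cons_eraseIdx {α : Type} (l : List α) (n : Nat) (x : α) (hn : n < l.length) :
    (l.set n x).Perm (x :: l.eraseIdx n) := by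
  rw [List.set_eq_take_cons_drop x hn, List.eraseIdx_eq_take_drop_succ]
  exact List.perm_middle

theorem pairs_decomp (s : List Int) (n : Nat) (h : n < s.length) :
    pairs s = (pairs s).take n ++ (s.getD n 0, (n : Int)) :: (pairs s).drop (n + 1) := by
  have hn : n < (pairs s).length := by rwa [length_pairs]
  conv_lhs => rw [← List.take_append_drop n (pairs s)]
  rw [List.drop_eq_getElem_cons hn, getElem_pairs s n hn]

theorem erase_pairs (s : List Int) (n : Nat) (h : n < s.length) :
    (pairs s).erase (s.getD n 0, (n : Int)) = (pairs s).eraseIdx n := by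
  rw [List.eraseIdx_eq_take_drop_succ]
  conv_lhs => rw [pairs_decomp s n h]
  rw [List.erase_append_right, List.erase_cons_head]
  intro hmem
  have hlen : ((pairs s).take n).length = n := by
    simp [length_pairs]; omega
  rcases List.mem_take_iff_getElem.1 hmem with ⟨j, hj, hje⟩
  have hj' : j < (pairs s).length := lt_of_lt_of_le (lt_of_lt_of_le hj (by omega : min n (pairs s).length ≤ n)) (by rw [length_pairs]; omega)
  rw [getElem_pairs s j hj'] at hje
  have : (j : Int) = (n : Int) := congrArg Prod.snd hje
  have : j = n := by exact_mod_cast this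
  omega

-- specification of grupo_min: it returns the first index achieving the minimal sum,
-- i.e. the lexicographic minimum of the (sum, index) pairs
theorem gm_aux (s : List Int) (m : Nat) (hm : m < s.length) :
    ∃ jn : Nat, jn ≤ m ∧ jn < s.length ∧
      ((List.range m).map (fun t : Nat => (1 : Int) + (t : Int))).foldl
        (fun (st : Int × Int) i =>
          let suma_act := PySem.List.pyGetD s i 0
          if suma_act < st.1 then (suma_act, i) else st)
        (PySem.List.pyGetD s 0 0, 0) = (s.getD jn 0, (jn : Int)) ∧
      ∀ j : Nat, j ≤ m → lexLe (s.getD jn 0, (jn : Int)) (s.getD j 0, (j : Int)) := by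
  induction m with
  | zero =>
    refine ⟨0, le_rfl, by omega, ?_, ?_⟩
    · simp only [List.range_zero, List.map_nil, List.foldl_nil]
      rw [show (0 : Int) = ((0 : Nat) : Int) by simp, PySem.List.pyGetD_natCast]
    · intro j hj; interval_cases j; exact lexLe_refl _
  | succ m ih =>
    rcases ih (by omega) with ⟨jn, hjm, hjn, heq, hmin⟩
    rw [List.range_succ, List.map_append, List.foldl_append, heq]
    simp only [List.map_cons, List.map_nil, List.foldl_cons, List.foldl_nil]
    have hg : PySem.List.pyGetD s ((1 : Int) + (m : Int)) 0 = s.getD (m + 1) 0 := by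
      rw [show (1 : Int) + (m : Int) = ((m + 1 : Nat) : Int) by push_cast; ring,
        PySem.List.pyGetD_natCast]
    by_cases hc : s.getD (m + 1) 0 < s.getD jn 0
    · refine ⟨m + 1, le_rfl, by omega, ?_, ?_⟩
      · simp only [hg, if_pos hc]
        congr 1; push_cast; ring
      · intro j hj
        rcases Nat.lt_or_ge j (m + 1) with hj' | hj'
        · exact lexLe_trans (Or.inl hc) (hmin j (by omega))
        · have : j = m + 1 := by omega
          subst this; exact lexLe_refl _
    · refine ⟨jn, by omega, hjn, ?_, ?_⟩
      · simp only [hg, if_neg hc]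
      · intro j hj
        rcases Nat.lt_or_ge j (m + 1) with hj' | hj'
        · exact hmin j (by omega)
        · have hje : j = m + 1 := by omega
          subst hje
          rcases lt_or_eq_of_le (not_lt.1 hc) with h' | h'
          · exact Or.inl h'
          · refine Or.inr ⟨h', ?_⟩
            show ((jn : Int)) ≤ (((m + 1 : Nat)) : Int)
            exact_mod_cast Nat.le_succ_of_le hjm

theorem gm_spec (s : List Int) (hs : s ≠ []) :
    ∃ jn : Nat, jn < s.length ∧ grupo_min s (s.length : Int) = (jn : Int) ∧
      ∀ j : Nat, j < s.length → lexLe (s.getD jn 0, (jn : Int)) (s.getD j 0, (j : Int)) := by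
  have hlen : 0 < s.length := List.length_pos_iff.2 hs
  rcases gm_aux s (s.length - 1) (by omega) with ⟨jn, hjm, hjn, heq, hmin⟩
  refine ⟨jn, hjn, ?_, fun j hj => hmin j (by omega)⟩
  unfold grupo_min
  rw [PySem.List.pyRange_one]
  have : ((s.length : Int) - 1).toNat = s.length - 1 := by omega
  rw [this, heq]

-- the loop invariant tying A's state to B's state
def LoopInv (k : Int) (st1 : List (List (String × Int)) × List Int × Int)
    (st2 : List (List (String × Int)) × List (Int × Int) × Int) : Prop :=
  st1.1 = st2.1 ∧ st1.2.2 = st2.2.2 ∧ ((st1.2.1.length : Int) = k) ∧ 0 < st1.2.1.length ∧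
  st2.2.1.Perm (pairs st1.2.1) ∧ st2.2.1.Pairwise lexLe

theorem step_inv (k : Int) (st1 : List (List (String × Int)) × List Int × Int)
    (st2 : List (List (String × Int)) × List (Int × Int) × Int)
    (m : String × Int) (h : LoopInv k st1 st2) : LoopInv k (pakkuStepA k st1 m) (pakkuStepB st2 m) := by
  obtain ⟨hg, ha, hk, hpos, hperm, hpair⟩ := h
  obtain ⟨g1, s1, a1⟩ := st1
  obtain ⟨g2, s2, a2⟩ := st2
  simp only at hg ha hk hpos hperm hpair
  subst hg ha
  -- s2 is nonempty
  have hs2len : s2.length = s1.length := by rw [hperm.length_eq, length_pairs]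
  rcases s2 with _ | ⟨⟨v, i⟩, rest⟩
  · simp at hs2len; omega
  -- the head of s2 is a pair (s1[n], n)
  have hhead : ((v, i) : Int × Int) ∈ pairs s1 := hperm.mem_iff.1 (List.mem_cons_self)
  rcases mem_pairs.1 hhead with ⟨n, hn, hne⟩
  have hv : v = s1.getD n 0 := by exact congrArg Prod.fst hne
  have hi : i = (n : Int) := by exact congrArg Prod.snd hne
  -- head is the lexicographic minimum of pairs s1
  have hmin2 : ∀ p ∈ pairs s1, lexLe (v, i) p := by
    intro p hp
    rcases List.mem_cons.1 (hperm.mem_iff.2 hp) with rfl | hp'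
    · exact lexLe_refl _
    · exact (List.pairwise_cons.1 hpair).1 _ hp'
  -- grupo_min picks exactly this index
  rcases gm_spec s1 (by intro h0; rw [h0] at hpos; simp at hpos) with ⟨jn, hjn, hgm, hminA⟩
  have he1 : lexLe (v, i) (s1.getD jn 0, (jn : Int)) :=
    hmin2 _ (mem_pairs.2 ⟨jn, hjn, rfl⟩)
  have he2 : lexLe (s1.getD jn 0, (jn : Int)) (v, i) := by
    rw [hv, hi]; exact hminA n hn
  have heq : ((s1.getD jn 0, (jn : Int)) : Int × Int) = (v, i) := lexLe_antisymm he2 he1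
  have hgm' : grupo_min s1 k = i := by
    rw [← hk, hgm]; exact congrArg Prod.snd heq
  have hitn : i.toNat = n := by rw [hi]; simp
  have hget : PySem.List.pyGetD s1 i 0 = v := by
    rw [hi, PySem.List.pyGetD_natCast, ← hv]
  -- compute both steps
  simp only [pakkuStepA, pakkuStepB, hgm', hget, hitn]
  refine ⟨rfl, by ring, ?_, ?_, ?_, ?_⟩
  · simpa using hk
  · simpa using hpos
  · -- permutation of the updated pair multiset
    have hins := bisect_insert_eq_rec rest (v + m.2, i) (List.pairwise_cons.1 hpair).2
    have h1 : (rest.take (bisectLoop rest (v + m.2, i) 0 rest.length) ++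
        (v + m.2, i) :: rest.drop (bisectLoop rest (v + m.2, i) 0 rest.length)).Perm
        ((v + m.2, i) :: rest) := by
      rw [hins]; exact insertarRec_perm _ _
    have h2 : rest.Perm ((pairs s1).erase (v, i)) := by
      have := (List.perm_cons_erase hhead).symm.trans hperm.symm
      exact (List.Perm.cons_inv this).symm
    have h3 : (pairs s1).erase (v, i) = (pairs s1).eraseIdx n := by
      rw [hv, hi]; exact erase_pairs s1 n hn
    have h4 : (pairs (s1.set n (v + m.2))).Perm ((v + m.2, i) :: (pairs s1).eraseIdx n) := by
      rw [pairs_set s1 n _ hn, hi]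
      exact set_perm_cons_eraseIdx _ n _ (by rwa [length_pairs])
    exact (h1.trans ((h2.trans (by rw [h3])).cons _)).trans h4.symm
  · -- sortedness of the updated list
    rw [bisect_insert_eq_rec rest (v + m.2, i) (List.pairwise_cons.1 hpair).2]
    exact insertarRec_pairwise (List.pairwise_cons.1 hpair).2

theorem fold_inv (k : Int) (L : List (String × Int))
    (st1 : List (List (String × Int)) × List Int × Int)
    (st2 : List (List (String × Int)) × List (Int × Int) × Int)
    (h : LoopInv k st1 st2) : LoopInv k (L.foldl (pakkuStepA k) st1) (L.foldl pakkuStepB st2) := by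
  induction L generalizing st1 st2 with
  | nil => exact h
  | cons x xs ih => exact ih _ _ (step_inv k st1 st2 x h)

theorem init_inv (k : Int) (hk : 0 < k) :
    LoopInv k (List.replicate k.toNat [], List.replicate k.toNat 0, 0)
      (List.replicate k.toNat [], (List.range k.toNat).map (fun i : Nat => ((0 : Int), (i : Int))), 0) := by
  refine ⟨rfl, rfl, by simp; omega, by simp; omega, ?_, ?_⟩
  · have : pairs (List.replicate k.toNat (0 : Int)) =
        (List.range k.toNat).map (fun i : Nat => ((0 : Int), (i : Int))) := by
      unfold pairs
      rw [List.length_replicate]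
      apply List.map_congr_left
      intro j hj
      rw [List.getD_eq_getElem _ _ (by simpa using List.mem_range.1 hj)]
      simp
    rw [this]
  · rw [List.pairwise_map]
    refine List.pairwise_lt_range.imp ?_
    intro a b hab
    refine Or.inr ⟨rfl, ?_⟩
    show ((a : Int)) ≤ (b : Int)
    exact_mod_cast le_of_lt hab

-- ===== VERDICT (by name: the statement is the Claim_ definition above) =====
theorem aproximador_pakku_spec : Claim_equal_aproximador_pakku := by
  intro ms k _ hpre
  unfold Spec_aproximador_pakku aproximador_pakku aproximador_pakku_alt
  by_cases hc : k < 0 ∨ ms = []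
  · rw [if_pos hc, if_pos hc]
  · rw [if_neg hc, if_neg hc]
    rw [not_or] at hc
    rcases hc with ⟨hc1, hc2⟩
    have hk : 0 < k := by
      rcases hpre with h | h
      · omega
      · exact absurd h hc2
    have h := fold_inv k (PySem.List.sorted ms (fun x => x.2) true) _ _ (init_inv k hk)
    obtain ⟨h1, h2, -⟩ := h
    simp only [h1, h2]
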